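-- pv_equiv track=rewrite | github.com/gaurav-ketkar/ResumeScan | Jobscan.py | naiveCalcMatch
-- ===== SOURCE A (Python) =====
-- from collections import Counter as c
--
-- def naiveCalcMatch(description, resume):
--     matchCounter = 0
--     descTally = c(description)
--     resTally = c(resume)
--     # If a word in Resume is found in the description, increment the counter
--     #  by the number of occurences of the word in the resume
--     for key in resTally:
--         if key in descTally:
--             matchCounter += resTally.get(key)
--     result = matchCounter
--     return round(result, 0)
-- ===== SOURCE B (Python) =====
-- def naiveCalcMatch(description, resume):
--     # sort-then-merge: walk the sorted resume with a single pointer into the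
--     # sorted distinct description words
--     ds = sorted(set(description))
--     count = 0
--     i = 0
--     for w in sorted(resume):
--         while i < len(ds) and ds[i] < w:
--             i += 1
--         if i < len(ds) and ds[i] == w:
--             count += 1
--     return round(count, 0)
-- ===== Notes on version B (the rewrite author's own statement) =====
-- stated objective: alternative
-- what changed: B replaces A's two hash Counters and its key-then-multiply aggregation with a sort-then-merge scan: it sorts the distinct description words and the resume, then counts matches with a single monotone pointer walked over both sorted sequences.
import Mathlib
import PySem

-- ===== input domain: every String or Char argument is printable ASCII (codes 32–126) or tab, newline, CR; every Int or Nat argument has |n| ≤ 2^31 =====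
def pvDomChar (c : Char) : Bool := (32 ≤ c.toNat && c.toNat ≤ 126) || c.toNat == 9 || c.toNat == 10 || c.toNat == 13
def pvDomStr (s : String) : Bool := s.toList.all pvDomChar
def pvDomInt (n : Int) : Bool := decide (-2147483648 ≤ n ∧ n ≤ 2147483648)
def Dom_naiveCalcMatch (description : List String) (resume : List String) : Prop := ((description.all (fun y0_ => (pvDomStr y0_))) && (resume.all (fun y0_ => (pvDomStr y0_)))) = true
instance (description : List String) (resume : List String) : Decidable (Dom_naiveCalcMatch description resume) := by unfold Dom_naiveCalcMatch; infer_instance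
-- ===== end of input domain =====

-- B replaces A's two Counters and its key-times-stored-count aggregation by a sort-then-merge
-- scan: sorted distinct description words, sorted resume, one monotone pointer (objective: alternative).

-- ===== PORT A =====
def naiveCalcMatch (description : List String) (resume : List String) : Int :=
  let descTally := PySem.Dict.counter description
  let resTally := PySem.Dict.counter resume
  let matchCounter := resTally.keys.foldl
    (fun acc key => if descTally.contains key then acc + resTally.getD key 0 else acc) 0
  let result := matchCounter
  result  -- round(result, 0) on a Python int is the identity

-- ===== PORT B =====
-- the 'while i < len(ds) and ds[i] < w: i += 1' loop: advancing the index past the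
-- elements smaller than w = dropping the prefix of elements smaller than w
def pvAdvance (w : String) : List String → List String
  | [] => []
  | d :: rest => if d < w then pvAdvance w rest else d :: rest

def naiveCalcMatch_alt (description : List String) (resume : List String) : Int :=
  let ds0 := PySem.List.sorted (PySem.Set.ofList description) (fun x => x) false
  let st := (PySem.List.sorted resume (fun x => x) false).foldl
    (fun (st : List String × Int) w =>
      let ds := pvAdvance w st.1
      (ds, if ds.head? = some w then st.2 + 1 else st.2)) (ds0, 0)
  st.2  -- round(count, 0) on a Python int is the identity

-- ===== PRECONDITION & SPEC =====
def Spec_naiveCalcMatch (description : List String) (resume : List String) (out : Int) : Prop := out = naiveCalcMatch_alt description resume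
instance (description : List String) (resume : List String) (out : Int) : Decidable (Spec_naiveCalcMatch description resume out) := by unfold Spec_naiveCalcMatch; infer_instance

-- ===== CLAIM (what is proved, stated in full; the proofs are below) =====
def Claim_equal_naiveCalcMatch : Prop := ∀ (description : List String) (resume : List String), Dom_naiveCalcMatch description resume → Spec_naiveCalcMatch description resume (naiveCalcMatch description resume)

-- ===== LEMMAS AND PROOFS =====

-- ---- A-side: A's Counter-key loop equals a membership count over the raw resume ----

-- splitting a countP over membership in (k :: ks) when k ∉ ks
theorem pv_countP_cons_split (xs ks : List String) (k : String) (p : String → Bool)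
    (hk : k ∉ ks) :
    xs.countP (fun x => p x && decide (x ∈ k :: ks))
      = (if p k then xs.count k else 0) + xs.countP (fun x => p x && decide (x ∈ ks)) := by
  induction xs with
  | nil => simp
  | cons x xs ih =>
    simp only [List.countP_cons, List.count_cons, ih]
    by_cases hxk : x = k
    · subst hxk
      by_cases hp : p x <;> simp [hp, hk] <;> omega
    · have h2 : decide (x ∈ k :: ks) = decide (x ∈ ks) := by simp [hxk]
      have h3 : (x == k) = false := by simp [hxk]
      rw [h2, h3]
      by_cases hp : p k <;> simp [hp] <;> omega

-- summing (if p k then xs.count k else 0) over a nodup key list ks equals countP (p ∧ · ∈ ks)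
theorem pv_sum_counts (xs : List String) (p : String → Bool) :
    ∀ (ks : List String), ks.Nodup →
    (ks.map (fun k => if p k then (xs.count k : Int) else 0)).sum
      = (xs.countP (fun x => p x && decide (x ∈ ks)) : Int) := by
  intro ks hnd
  induction ks with
  | nil => simp
  | cons k ks ih =>
    have hk : k ∉ ks := (List.nodup_cons.mp hnd).1
    rw [List.map_cons, List.sum_cons, ih (List.nodup_cons.mp hnd).2,
        pv_countP_cons_split xs ks k p hk]
    push_cast
    by_cases hp : p k <;> simp [hp]

theorem pv_A_eq_countP (description resume : List String) :
    naiveCalcMatch description resume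
      = (resume.countP (fun x => decide (x ∈ description)) : Int) := by
  show (PySem.Dict.counter resume).keys.foldl
      (fun acc key => if (PySem.Dict.counter description).contains key then acc + (PySem.Dict.counter resume).getD key 0 else acc) 0
    = _
  have hA : (PySem.Dict.counter resume).keys.foldl
      (fun acc key => if (PySem.Dict.counter description).contains key then acc + (PySem.Dict.counter resume).getD key 0 else acc) 0
    = (PySem.Dict.counter resume).keys.foldl
      (fun acc key => acc + (if (PySem.Dict.counter description).contains key then (resume.count key : Int) else 0)) 0 :=
    PySem.List.foldl_congr_mem _ _ _ _ (by
      intro acc x hx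
      by_cases h : (PySem.Dict.counter description).contains x <;>
        simp [h, PySem.Dict.getD_counter])
  rw [hA, PySem.List.foldl_add]
  simp only [PySem.Dict.keys_counter, PySem.Dict.contains_counter, zero_add]
  rw [pv_sum_counts resume (fun k => description.contains k) (PySem.Set.ofList resume)
        (PySem.Set.nodup_ofList resume)]
  congr 1
  refine List.countP_congr ?_
  intro x hx
  have h1 : x ∈ PySem.Set.ofList resume := by simpa [PySem.Set.mem_ofList] using hx
  simp [h1, PySem.Set.mem_ofList, List.contains_iff_mem]

-- ---- B-side: the merge scan equals the same membership count ----

theorem pv_advance_mem (w x : String) (hwx : w ≤ x) :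
    ∀ ds : List String, x ∈ pvAdvance w ds ↔ x ∈ ds := by
  intro ds
  induction ds with
  | nil => simp [pvAdvance]
  | cons d rest ih =>
    by_cases hd : d < w
    · have hne : x ≠ d := fun h => absurd (lt_of_lt_of_le hd hwx) (by simp [h])
      simp [pvAdvance, hd, hne, ih]
    · simp [pvAdvance, hd]

theorem pv_advance_pairwise (w : String) (ds : List String)
    (h : ds.Pairwise (· ≤ ·)) : (pvAdvance w ds).Pairwise (· ≤ ·) := by
  induction ds with
  | nil => simpa [pvAdvance]
  | cons d rest ih =>
    by_cases hd : d < w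
    · exact by simpa [pvAdvance, hd] using ih (List.pairwise_cons.mp h).2
    · simpa [pvAdvance, hd] using h

theorem pv_advance_head (w : String) (ds : List String)
    (h : ds.Pairwise (· ≤ ·)) :
    ((pvAdvance w ds).head? = some w) ↔ w ∈ ds := by
  induction ds with
  | nil => simp [pvAdvance]
  | cons d rest ih =>
    obtain ⟨hall, htail⟩ := List.pairwise_cons.mp h
    by_cases hd : d < w
    · have hne : w ≠ d := fun h' => absurd hd (by simp [h'])
      simp [pvAdvance, hd, ih htail, hne]
    · by_cases hdw : d = w
      · simp [pvAdvance, hd, hdw]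
      · have hwd : w < d := lt_of_le_of_ne (le_of_not_gt hd) (Ne.symm hdw)
        have hnot : w ∉ rest := fun hmem =>
          absurd (lt_of_lt_of_le hwd (hall w hmem)) (lt_irrefl w)
        simp [pvAdvance, hd, Ne.symm hdw, hdw, hnot]

theorem pv_merge_loop (rs : List String) :
    ∀ (ds : List String) (count : Int), ds.Pairwise (· ≤ ·) → rs.Pairwise (· ≤ ·) →
    (rs.foldl (fun (st : List String × Int) w =>
        let ds' := pvAdvance w st.1
        (ds', if ds'.head? = some w then st.2 + 1 else st.2)) (ds, count)).2
      = count + (rs.countP (fun x => decide (x ∈ ds)) : Int) := by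
  induction rs with
  | nil => intro ds count _ _; simp
  | cons w rs ih =>
    intro ds count hds hrs
    obtain ⟨hall, htail⟩ := List.pairwise_cons.mp hrs
    simp only [List.foldl_cons]
    rw [ih (pvAdvance w ds) _ (pv_advance_pairwise w ds hds) htail]
    have hcount : (rs.countP (fun x => decide (x ∈ pvAdvance w ds)) : Int)
        = (rs.countP (fun x => decide (x ∈ ds)) : Int) := by
      congr 1
      refine List.countP_congr ?_
      intro x hx
      simp [pv_advance_mem w x (hall x hx) ds]
    rw [hcount, List.countP_cons]
    have hhead := pv_advance_head w ds hds
    by_cases hw : w ∈ ds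
    · simp only [hhead.mpr hw, hw]
      simp
      ring
    · have hno : ¬((pvAdvance w ds).head? = some w) := fun h => hw (hhead.mp h)
      simp [hno, hw]

theorem pv_B_eq_countP (description resume : List String) :
    naiveCalcMatch_alt description resume
      = (resume.countP (fun x => decide (x ∈ description)) : Int) := by
  show ((PySem.List.sorted resume (fun x => x) false).foldl _
          (PySem.List.sorted (PySem.Set.ofList description) (fun x => x) false, 0)).2 = _
  rw [pv_merge_loop _ _ _
        (PySem.List.sorted_pairwise (PySem.Set.ofList description) (fun x => x))
        (PySem.List.sorted_pairwise resume (fun x => x))]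
  rw [zero_add]
  rw [(PySem.List.sorted_perm resume (fun x => x) false).countP_eq]
  congr 1
  refine List.countP_congr ?_
  intro x hx
  simp [PySem.List.mem_sorted, PySem.Set.mem_ofList]

-- ===== VERDICT (by name: the statement is the Claim_ definition above) =====
theorem naiveCalcMatch_spec : Claim_equal_naiveCalcMatch := by
  intro description resume _
  show naiveCalcMatch description resume = naiveCalcMatch_alt description resume
  rw [pv_A_eq_countP, pv_B_eq_countP]
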